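-- pv_equiv track=rewrite | github.com/Dipankar2105/Chikitsak-AI-Powered-Personalized-Health-Operating-System | backend/app/services/medication_adherence_service.py | check_drug_interactions
-- ===== SOURCE A (Python) =====
-- from typing import Dict, Any, List, Optional
--
-- DRUG_INTERACTIONS: Dict[str, Dict[str, Dict[str, str]]] = {
--     "warfarin": {
--         "aspirin": {"severity": "high", "effect": "Increased bleeding risk. Use together only under close medical supervision."},
--         "ibuprofen": {"severity": "high", "effect": "NSAIDs increase bleeding risk with warfarin. Avoid combination."},
--         "metformin": {"severity": "low", "effect": "Minimal interaction. Monitor INR."},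
--         "amoxicillin": {"severity": "moderate", "effect": "Antibiotics may alter warfarin metabolism. Monitor INR closely."},
--     },
--     "metformin": {
--         "alcohol": {"severity": "high", "effect": "Alcohol increases lactic acidosis risk with metformin. Limit alcohol."},
--         "lisinopril": {"severity": "low", "effect": "Generally safe combination, commonly co-prescribed."},
--         "ibuprofen": {"severity": "moderate", "effect": "NSAIDs may reduce kidney function, affecting metformin clearance."},
--     },
--     "lisinopril": {
--         "potassium": {"severity": "moderate", "effect": "ACE inhibitors raise potassium. Avoid potassium supplements."},
--         "spironolactone": {"severity": "high", "effect": "Both raise potassium. Risk of hyperkalemia. Monitor closely."},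
--         "ibuprofen": {"severity": "moderate", "effect": "NSAIDs reduce ACE inhibitor effectiveness and worsen kidney function."},
--     },
--     "atorvastatin": {
--         "grapefruit": {"severity": "moderate", "effect": "Grapefruit inhibits statin metabolism, increasing side effect risk."},
--         "amiodarone": {"severity": "high", "effect": "Increased risk of rhabdomyolysis. Reduce statin dose."},
--         "erythromycin": {"severity": "high", "effect": "CYP3A4 inhibitor increases statin levels. Risk of myopathy."},
--     },
--     "amlodipine": {
--         "simvastatin": {"severity": "moderate", "effect": "Amlodipine increases simvastatin levels. Limit simvastatin to 20mg."},
--         "lisinopril": {"severity": "low", "effect": "Commonly co-prescribed for hypertension. Safe combination."},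
--     },
--     "omeprazole": {
--         "clopidogrel": {"severity": "high", "effect": "Omeprazole reduces clopidogrel effectiveness. Use pantoprazole instead."},
--         "metformin": {"severity": "low", "effect": "May decrease vitamin B12 absorption long-term."},
--         "iron": {"severity": "moderate", "effect": "PPIs reduce iron absorption. Take iron 2hrs before PPI."},
--     },
--     "sertraline": {
--         "tramadol": {"severity": "high", "effect": "Serotonin syndrome risk. Avoid combination."},
--         "ibuprofen": {"severity": "moderate", "effect": "SSRIs + NSAIDs increase GI bleeding risk."},
--         "warfarin": {"severity": "moderate", "effect": "SSRIs may increase warfarin effect. Monitor INR."},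
--     },
-- }
--
-- def check_drug_interactions(medications: List[str]) -> List[Dict[str, Any]]:
--     """
--     Check for interactions between a list of medications.
--
--     Returns list of detected interactions with severity and advice.
--     """
--     interactions = []
--     meds_lower = [m.strip().lower() for m in medications]
--
--     for i, med1 in enumerate(meds_lower):
--         for j, med2 in enumerate(meds_lower):
--             if i >= j:
--                 continue
--             # Check both directions
--             interaction = None
--             if med1 in DRUG_INTERACTIONS and med2 in DRUG_INTERACTIONS[med1]:
--                 interaction = DRUG_INTERACTIONS[med1][med2]
--                 drug_a, drug_b = medications[i], medications[j]
--             elif med2 in DRUG_INTERACTIONS and med1 in DRUG_INTERACTIONS[med2]: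
--                 interaction = DRUG_INTERACTIONS[med2][med1]
--                 drug_a, drug_b = medications[j], medications[i]
--
--             if interaction:
--                 interactions.append({
--                     "drug_a": drug_a,
--                     "drug_b": drug_b,
--                     "severity": interaction["severity"],
--                     "effect": interaction["effect"],
--                     "action": (
--                         "Avoid this combination" if interaction["severity"] == "high" else
--                         "Use with caution, monitor closely" if interaction["severity"] == "moderate" else
--                         "Generally safe, routine monitoring"
--                     ),
--                 })
--
--     return interactions
-- ===== SOURCE B (Python) =====
-- from typing import Dict, Any, List, Optional
--
-- DRUG_INTERACTIONS: Dict[str, Dict[str, Dict[str, str]]] = {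
--     "warfarin": {
--         "aspirin": {"severity": "high", "effect": "Increased bleeding risk. Use together only under close medical supervision."},
--         "ibuprofen": {"severity": "high", "effect": "NSAIDs increase bleeding risk with warfarin. Avoid combination."},
--         "metformin": {"severity": "low", "effect": "Minimal interaction. Monitor INR."},
--         "amoxicillin": {"severity": "moderate", "effect": "Antibiotics may alter warfarin metabolism. Monitor INR closely."},
--     },
--     "metformin": {
--         "alcohol": {"severity": "high", "effect": "Alcohol increases lactic acidosis risk with metformin. Limit alcohol."},
--         "lisinopril": {"severity": "low", "effect": "Generally safe combination, commonly co-prescribed."},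
--         "ibuprofen": {"severity": "moderate", "effect": "NSAIDs may reduce kidney function, affecting metformin clearance."},
--     },
--     "lisinopril": {
--         "potassium": {"severity": "moderate", "effect": "ACE inhibitors raise potassium. Avoid potassium supplements."},
--         "spironolactone": {"severity": "high", "effect": "Both raise potassium. Risk of hyperkalemia. Monitor closely."},
--         "ibuprofen": {"severity": "moderate", "effect": "NSAIDs reduce ACE inhibitor effectiveness and worsen kidney function."},
--     },
--     "atorvastatin": {
--         "grapefruit": {"severity": "moderate", "effect": "Grapefruit inhibits statin metabolism, increasing side effect risk."},
--         "amiodarone": {"severity": "high", "effect": "Increased risk of rhabdomyolysis. Reduce statin dose."},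
--         "erythromycin": {"severity": "high", "effect": "CYP3A4 inhibitor increases statin levels. Risk of myopathy."},
--     },
--     "amlodipine": {
--         "simvastatin": {"severity": "moderate", "effect": "Amlodipine increases simvastatin levels. Limit simvastatin to 20mg."},
--         "lisinopril": {"severity": "low", "effect": "Commonly co-prescribed for hypertension. Safe combination."},
--     },
--     "omeprazole": {
--         "clopidogrel": {"severity": "high", "effect": "Omeprazole reduces clopidogrel effectiveness. Use pantoprazole instead."},
--         "metformin": {"severity": "low", "effect": "May decrease vitamin B12 absorption long-term."},
--         "iron": {"severity": "moderate", "effect": "PPIs reduce iron absorption. Take iron 2hrs before PPI."},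
--     },
--     "sertraline": {
--         "tramadol": {"severity": "high", "effect": "Serotonin syndrome risk. Avoid combination."},
--         "ibuprofen": {"severity": "moderate", "effect": "SSRIs + NSAIDs increase GI bleeding risk."},
--         "warfarin": {"severity": "moderate", "effect": "SSRIs may increase warfarin effect. Monitor INR."},
--     },
-- }
--
--
-- def check_drug_interactions(medications: List[str]) -> List[Dict[str, Any]]:
--     """
--     Check for interactions between a list of medications.
--
--     Index drug -> positions once, walk the constant interaction table's edges,
--     and sort the matches back into pairwise (i, j) order.
--     """
--     meds_lower = [m.strip().lower() for m in medications]
--     n = len(medications)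
--
--     pos: Dict[str, List[int]] = {}
--     for idx, m in enumerate(meds_lower):
--         pos.setdefault(m, []).append(idx)
--
--     keyed = []
--     for med_a, inner in DRUG_INTERACTIONS.items():
--         for med_b, info in inner.items():
--             for p in pos.get(med_a, []):
--                 for q in pos.get(med_b, []):
--                     if p == q:
--                         continue
--                     i, j = (p, q) if p < q else (q, p)
--                     severity = info["severity"]
--                     keyed.append((i * n + j, {  # i * n + j = linear index of the pair (i, j)
--                         "drug_a": medications[p],
--                         "drug_b": medications[q],
--                         "severity": severity,
--                         "effect": info["effect"],
--                         "action": (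
--                             "Avoid this combination" if severity == "high" else
--                             "Use with caution, monitor closely" if severity == "moderate" else
--                             "Generally safe, routine monitoring"
--                         ),
--                     }))
--
--     keyed.sort(key=lambda t: t[0])
--     return [entry for _, entry in keyed]
-- ===== Notes on version B (the rewrite author's own statement) =====
-- stated objective: faster
-- what changed: A scans all n^2 ordered medication pairs and probes the interaction dict per pair; B builds a drug->positions index in one pass, walks only the constant table's 19 directed edges cross-joining the matching position lists, and sorts the k matches back into A's pairwise (i,j) order by a linear pair key.
import Mathlib
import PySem

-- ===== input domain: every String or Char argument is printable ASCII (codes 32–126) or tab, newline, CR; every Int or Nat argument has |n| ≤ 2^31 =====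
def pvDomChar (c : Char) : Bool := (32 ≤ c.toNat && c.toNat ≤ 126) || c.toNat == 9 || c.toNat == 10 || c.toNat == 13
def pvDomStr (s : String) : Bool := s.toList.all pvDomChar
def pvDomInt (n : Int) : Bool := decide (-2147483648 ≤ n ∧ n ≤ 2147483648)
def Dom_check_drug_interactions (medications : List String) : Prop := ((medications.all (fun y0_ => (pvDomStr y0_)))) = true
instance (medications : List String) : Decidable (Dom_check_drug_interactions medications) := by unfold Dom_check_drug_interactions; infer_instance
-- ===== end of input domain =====

-- B replaces A's all-pairs O(n^2) scan by a drug->positions index walked along the constant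
-- interaction table's edges, sorting the matches back into A's pairwise (i, j) output order.

-- ===== PORT A =====
-- shared module-level constant DRUG_INTERACTIONS (nested dicts, insertion order)
def DRUG_INTERACTIONS : PySem.Dict String (PySem.Dict String (PySem.Dict String String)) :=
  PySem.Dict.ofList [
    ("warfarin", PySem.Dict.ofList [
      ("aspirin", PySem.Dict.ofList [("severity", "high"), ("effect", "Increased bleeding risk. Use together only under close medical supervision.")]),
      ("ibuprofen", PySem.Dict.ofList [("severity", "high"), ("effect", "NSAIDs increase bleeding risk with warfarin. Avoid combination.")]),
      ("metformin", PySem.Dict.ofList [("severity", "low"), ("effect", "Minimal interaction. Monitor INR.")]),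
      ("amoxicillin", PySem.Dict.ofList [("severity", "moderate"), ("effect", "Antibiotics may alter warfarin metabolism. Monitor INR closely.")])]),
    ("metformin", PySem.Dict.ofList [
      ("alcohol", PySem.Dict.ofList [("severity", "high"), ("effect", "Alcohol increases lactic acidosis risk with metformin. Limit alcohol.")]),
      ("lisinopril", PySem.Dict.ofList [("severity", "low"), ("effect", "Generally safe combination, commonly co-prescribed.")]),
      ("ibuprofen", PySem.Dict.ofList [("severity", "moderate"), ("effect", "NSAIDs may reduce kidney function, affecting metformin clearance.")])]),
    ("lisinopril", PySem.Dict.ofList [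
      ("potassium", PySem.Dict.ofList [("severity", "moderate"), ("effect", "ACE inhibitors raise potassium. Avoid potassium supplements.")]),
      ("spironolactone", PySem.Dict.ofList [("severity", "high"), ("effect", "Both raise potassium. Risk of hyperkalemia. Monitor closely.")]),
      ("ibuprofen", PySem.Dict.ofList [("severity", "moderate"), ("effect", "NSAIDs reduce ACE inhibitor effectiveness and worsen kidney function.")])]),
    ("atorvastatin", PySem.Dict.ofList [
      ("grapefruit", PySem.Dict.ofList [("severity", "moderate"), ("effect", "Grapefruit inhibits statin metabolism, increasing side effect risk.")]),
      ("amiodarone", PySem.Dict.ofList [("severity", "high"), ("effect", "Increased risk of rhabdomyolysis. Reduce statin dose.")]),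
      ("erythromycin", PySem.Dict.ofList [("severity", "high"), ("effect", "CYP3A4 inhibitor increases statin levels. Risk of myopathy.")])]),
    ("amlodipine", PySem.Dict.ofList [
      ("simvastatin", PySem.Dict.ofList [("severity", "moderate"), ("effect", "Amlodipine increases simvastatin levels. Limit simvastatin to 20mg.")]),
      ("lisinopril", PySem.Dict.ofList [("severity", "low"), ("effect", "Commonly co-prescribed for hypertension. Safe combination.")])]),
    ("omeprazole", PySem.Dict.ofList [
      ("clopidogrel", PySem.Dict.ofList [("severity", "high"), ("effect", "Omeprazole reduces clopidogrel effectiveness. Use pantoprazole instead.")]),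
      ("metformin", PySem.Dict.ofList [("severity", "low"), ("effect", "May decrease vitamin B12 absorption long-term.")]),
      ("iron", PySem.Dict.ofList [("severity", "moderate"), ("effect", "PPIs reduce iron absorption. Take iron 2hrs before PPI.")])]),
    ("sertraline", PySem.Dict.ofList [
      ("tramadol", PySem.Dict.ofList [("severity", "high"), ("effect", "Serotonin syndrome risk. Avoid combination.")]),
      ("ibuprofen", PySem.Dict.ofList [("severity", "moderate"), ("effect", "SSRIs + NSAIDs increase GI bleeding risk.")]),
      ("warfarin", PySem.Dict.ofList [("severity", "moderate"), ("effect", "SSRIs may increase warfarin effect. Monitor INR.")])])]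

-- every loop of A appends to `interactions`; the entry dict is its association list in insertion order;
-- medications[i] is read with pyGetD (the index comes from enumerate, so it is always in range and
-- Python cannot raise); info["severity"]/info["effect"] are read with getD "" (both keys are present
-- in every info dict of the literal table, so Python cannot raise KeyError there either)
def check_drug_interactions (medications : List String) : List (List (String × String)) :=
  let meds_lower := medications.map (fun m => PySem.Str.lower (PySem.Str.strip m))
  (PySem.List.enumerate meds_lower).foldl (fun interactions p1 =>
    (PySem.List.enumerate meds_lower).foldl (fun interactions p2 =>
      if p1.1 ≥ p2.1 then interactions
      else
        -- `interaction` together with (drug_a, drug_b): `med1 in D and med2 in D[med1]` fused into get?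
        let found : Option (PySem.Dict String String × String × String) :=
          match (DRUG_INTERACTIONS.get? p1.2).bind (fun d => d.get? p2.2) with
          | some interaction =>
              some (interaction, PySem.List.pyGetD medications p1.1 "", PySem.List.pyGetD medications p2.1 "")
          | none =>
              match (DRUG_INTERACTIONS.get? p2.2).bind (fun d => d.get? p1.2) with
              | some interaction =>
                  some (interaction, PySem.List.pyGetD medications p2.1 "", PySem.List.pyGetD medications p1.1 "")
              | none => none
        match found with
        | none => interactions
        | some (interaction, drug_a, drug_b) =>
            interactions ++
              [[("drug_a", drug_a), ("drug_b", drug_b),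
                ("severity", interaction.getD "severity" ""),
                ("effect", interaction.getD "effect" ""),
                ("action",
                  if interaction.getD "severity" "" == "high" then "Avoid this combination"
                  else if interaction.getD "severity" "" == "moderate" then "Use with caution, monitor closely"
                  else "Generally safe, routine monitoring")]])
      interactions) []

-- ===== PORT B =====
-- Source B: build pos (drug -> positions) with setdefault/append, walk DRUG_INTERACTIONS.items(),
-- collect (i*n+j, entry) matches, sort by the linear pair key, strip the keys
def check_drug_interactions_alt (medications : List String) : List (List (String × String)) :=
  let meds_lower := medications.map (fun m => PySem.Str.lower (PySem.Str.strip m))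
  let n : Int := PySem.List.len medications
  let pos : PySem.Dict String (List Int) :=
    (PySem.List.enumerate meds_lower).foldl (fun d p => d.modify p.2 [] (fun l => l ++ [p.1])) PySem.Dict.empty
  let keyed : List (Int × List (String × String)) :=
    DRUG_INTERACTIONS.items.foldl (fun keyed ae =>
      ae.2.items.foldl (fun keyed be =>
        (pos.getD ae.1 []).foldl (fun keyed p =>
          (pos.getD be.1 []).foldl (fun keyed q =>
            if p == q then keyed
            else
              let i := if p < q then p else q
              let j := if p < q then q else p
              let severity := be.2.getD "severity" ""
              keyed ++
                [(i * n + j,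
                  [("drug_a", PySem.List.pyGetD medications p ""),
                   ("drug_b", PySem.List.pyGetD medications q ""),
                   ("severity", severity),
                   ("effect", be.2.getD "effect" ""),
                   ("action",
                     if severity == "high" then "Avoid this combination"
                     else if severity == "moderate" then "Use with caution, monitor closely"
                     else "Generally safe, routine monitoring")])])
            keyed) keyed) keyed) []
  (PySem.List.sorted keyed (fun t => t.1)).map (fun t => t.2)

-- ===== PRECONDITION & SPEC =====
def Spec_check_drug_interactions (medications : List String) (out : List (List (String × String))) : Prop := out = check_drug_interactions_alt medications
instance (medications : List String) (out : List (List (String × String))) : Decidable (Spec_check_drug_interactions medications out) := by unfold Spec_check_drug_interactions; infer_instance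

-- ===== CLAIM (what is proved, stated in full; the proofs are below) =====
def Claim_equal_check_drug_interactions : Prop := ∀ (medications : List String), Dom_check_drug_interactions medications → Spec_check_drug_interactions medications (check_drug_interactions medications)

-- ===== LEMMAS AND PROOFS =====

-- abbreviations for the proofs (the normalised medication list, its length, table lookup,
-- the entry dict both ports build, the linear pair key, A's per-pair hit list)
def pvL (meds : List String) : List String := meds.map (fun m => PySem.Str.lower (PySem.Str.strip m))
def pvN (meds : List String) : Int := PySem.List.len meds
def pvLook (a b : String) : Option (PySem.Dict String String) :=
  (DRUG_INTERACTIONS.get? a).bind (fun d => d.get? b)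
def pvEntry (meds : List String) (info : PySem.Dict String String) (p q : Int) : List (String × String) :=
  [("drug_a", PySem.List.pyGetD meds p ""),
   ("drug_b", PySem.List.pyGetD meds q ""),
   ("severity", info.getD "severity" ""),
   ("effect", info.getD "effect" ""),
   ("action",
     if info.getD "severity" "" == "high" then "Avoid this combination"
     else if info.getD "severity" "" == "moderate" then "Use with caution, monitor closely"
     else "Generally safe, routine monitoring")]
def pvKey (n p q : Int) : Int := (if p < q then p else q) * n + (if p < q then q else p)
def pvHit (meds : List String) (p1 p2 : Int × String) : List (Int × List (String × String)) :=
  if p1.1 ≥ p2.1 then []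
  else
    match pvLook p1.2 p2.2 with
    | some info => [(p1.1 * pvN meds + p2.1, pvEntry meds info p1.1 p2.1)]
    | none =>
      match pvLook p2.2 p1.2 with
      | some info => [(p1.1 * pvN meds + p2.1, pvEntry meds info p2.1 p1.1)]
      | none => []
def pvK0 (meds : List String) : List (Int × List (String × String)) :=
  (PySem.List.enumerate (pvL meds)).flatMap fun p1 =>
    (PySem.List.enumerate (pvL meds)).flatMap fun p2 => pvHit meds p1 p2
def pvPos (meds : List String) : PySem.Dict String (List Int) :=
  (PySem.List.enumerate (pvL meds)).foldl (fun d p => d.modify p.2 [] (fun l => l ++ [p.1])) PySem.Dict.empty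
def pvK (meds : List String) : List (Int × List (String × String)) :=
  DRUG_INTERACTIONS.items.flatMap fun ae =>
    ae.2.items.flatMap fun be =>
      ((pvPos meds).getD ae.1 []).flatMap fun p =>
        ((pvPos meds).getD be.1 []).flatMap fun q =>
          if p == q then [] else [(pvKey (pvN meds) p q, pvEntry meds be.2 p q)]
-- the common characterisation of a match: an ordered pair of distinct positions whose
-- normalised names are a directed edge of the table
def pvDesc (meds : List String) (z : Int × List (String × String)) : Prop :=
  ∃ p q : Nat, p < meds.length ∧ q < meds.length ∧ p ≠ q ∧
    ∃ info, pvLook ((pvL meds).getD p "") ((pvL meds).getD q "") = some info ∧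
      z = (pvKey (pvN meds) (p : Int) (q : Int), pvEntry meds info (p : Int) (q : Int))

-- concrete facts about the literal table
theorem tf_nodup_outer : DRUG_INTERACTIONS.keys.Nodup := by decide
theorem tf_nodup_inner : ∀ ae ∈ DRUG_INTERACTIONS.items, ae.2.keys.Nodup := by decide
theorem tf_irrefl : ∀ ae ∈ DRUG_INTERACTIONS.items, ∀ be ∈ ae.2.items, ¬ ae.1 = be.1 := by decide
theorem tf_asym : ∀ ae ∈ DRUG_INTERACTIONS.items, ∀ be ∈ ae.2.items, pvLook be.1 ae.1 = none := by decide

theorem look_iff (x y : String) (info : PySem.Dict String String) :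
    pvLook x y = some info ↔
      ∃ ae ∈ DRUG_INTERACTIONS.items, ae.1 = x ∧ ∃ be ∈ ae.2.items, be.1 = y ∧ be.2 = info := by
  unfold pvLook
  constructor
  · intro h
    rcases hd : DRUG_INTERACTIONS.get? x with _ | d
    · rw [hd] at h; simp at h
    · rw [hd] at h
      simp only [Option.bind_some] at h
      exact ⟨(x, d), PySem.Dict.mem_items_of_get?_eq_some _ hd, rfl,
        (y, info), PySem.Dict.mem_items_of_get?_eq_some _ h, rfl, rfl⟩
  · rintro ⟨ae, hae, rfl, be, hbe, rfl, rfl⟩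
    have h1 : DRUG_INTERACTIONS.get? ae.1 = some ae.2 :=
      PySem.Dict.get?_of_mem_items _ (by exact hae) tf_nodup_outer
    have h2 : ae.2.get? be.1 = some be.2 :=
      PySem.Dict.get?_of_mem_items _ (by exact hbe) (tf_nodup_inner ae hae)
    rw [h1, Option.bind_some, h2]

theorem foldl_body_append {α β : Type} (l : List α) (f : List β → α → List β) (g : α → List β)
    (h : ∀ acc x, f acc x = acc ++ g x) (acc : List β) : l.foldl f acc = acc ++ l.flatMap g := by
  rw [PySem.List.foldl_congr_mem l f (fun acc x => acc ++ g x) acc (fun acc x _ => h acc x),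
    PySem.List.foldl_append_eq_flatMap]

theorem lin_inj (n a b a' b' : Int) (hb : 0 ≤ b) (hbn : b < n) (hb' : 0 ≤ b') (hbn' : b' < n)
    (h : a * n + b = a' * n + b') : a = a' ∧ b = b' := by
  have hn : 0 < n := lt_of_le_of_lt hb hbn
  have ha : a = a' := by
    by_contra hne
    rcases lt_or_gt_of_ne hne with hlt | hgt
    · have h1 : a + 1 ≤ a' := hlt
      nlinarith
    · have h1 : a' + 1 ≤ a := hgt
      nlinarith
  subst ha
  exact ⟨rfl, by linarith⟩

theorem pos_eq (meds : List String) (x : String) :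
    (pvPos meds).getD x [] =
      ((((PySem.List.enumerate (pvL meds)).map Prod.swap).filter (fun r => r.1 == x)).map (fun r => r.2)) := by
  unfold pvPos
  have hswap : (PySem.List.enumerate (pvL meds)).foldl
      (fun d p => d.modify p.2 [] (fun l => l ++ [p.1])) PySem.Dict.empty =
    ((PySem.List.enumerate (pvL meds)).map Prod.swap).foldl
      (fun d p => d.modify p.1 [] (fun l => l ++ [p.2])) PySem.Dict.empty := by
    rw [List.foldl_map]
    rfl
  rw [hswap, PySem.Dict.getD_foldl_modify_append, PySem.Dict.getD_empty]
  simp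

theorem mem_pos_iff (meds : List String) (x : String) (q : Int) :
    q ∈ (pvPos meds).getD x [] ↔
      ∃ k : Nat, k < meds.length ∧ (pvL meds).getD k "" = x ∧ q = (k : Int) := by
  rw [pos_eq]
  simp only [List.mem_map, List.mem_filter, PySem.List.mem_enumerate_iff]
  constructor
  · rintro ⟨a, ⟨⟨a1, ⟨k, hk, rfl⟩, rfl⟩, hx⟩, rfl⟩
    refine ⟨k, by simpa [pvL] using hk, ?_, by simp⟩
    have hx' : (pvL meds)[k] = x := by simpa using hx
    simp [List.getD_eq_getElem?_getD, List.getElem?_eq_getElem hk, hx']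
  · rintro ⟨k, hk, hx, rfl⟩
    have hk' : k < (pvL meds).length := by simpa [pvL] using hk
    refine ⟨((pvL meds)[k], (0 : Int) + (k : Int)), ⟨⟨((0 : Int) + (k : Int), (pvL meds)[k]), ⟨k, hk', rfl⟩, rfl⟩, ?_⟩, by simp⟩
    simp only [List.getD_eq_getElem?_getD, List.getElem?_eq_getElem hk'] at hx
    simpa using hx

theorem pos_val_eq (meds : List String) (x y : String) (q : Int)
    (hx : q ∈ (pvPos meds).getD x []) (hy : q ∈ (pvPos meds).getD y []) : x = y := by
  rcases (mem_pos_iff meds x q).1 hx with ⟨k, hk, hvx, hq⟩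
  rcases (mem_pos_iff meds y q).1 hy with ⟨k', hk', hvy, hq'⟩
  have : k = k' := by omega
  subst this
  rw [← hvx, ← hvy]

theorem pos_bounds (meds : List String) (x : String) (q : Int)
    (hx : q ∈ (pvPos meds).getD x []) : 0 ≤ q ∧ q < pvN meds := by
  rcases (mem_pos_iff meds x q).1 hx with ⟨k, hk, _, hq⟩
  have : pvN meds = (meds.length : Int) := by simp [pvN]
  omega

theorem pos_pairwise (meds : List String) (x : String) :
    ((pvPos meds).getD x []).Pairwise (· < ·) := by
  rw [pos_eq]
  refine List.Pairwise.map _ (fun a b h => h) ?_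
  refine List.Pairwise.filter _ ?_
  refine List.Pairwise.map _ (fun a b h => ?_) (PySem.List.pairwise_lt_enumerate (pvL meds) 0)
  simpa [Prod.swap] using h

theorem key_inj (n p q p' q' : Int) (hp : 0 ≤ p) (hq : 0 ≤ q) (hp' : 0 ≤ p') (hq' : 0 ≤ q')
    (hpn : p < n) (hqn : q < n) (hpn' : p' < n) (hqn' : q' < n)
    (h : pvKey n p q = pvKey n p' q') :
    (p = p' ∧ q = q') ∨ (p = q' ∧ q = p') := by
  unfold pvKey at h
  split_ifs at h with h1 h2 h2 <;>
    rcases lin_inj n _ _ _ _ (by omega) (by omega) (by omega) (by omega) h with ⟨e1, e2⟩ <;> omega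

theorem enum_bounds (meds : List String) (r : Int × String) (h : r ∈ PySem.List.enumerate (pvL meds)) :
    0 ≤ r.1 ∧ r.1 < pvN meds := by
  rcases (PySem.List.mem_enumerate_iff _ _ _).1 h with ⟨k, hk, rfl⟩
  have hlen : (pvL meds).length = meds.length := by simp [pvL]
  have hn : pvN meds = (meds.length : Int) := by simp [pvN]
  refine ⟨by simp, by simp; omega⟩

theorem key_lt (n i j i' j' : Int) (hj0 : 0 ≤ j) (hj : j < n) (hii' : i < i') (hj' : 0 ≤ j') :
    i * n + j < i' * n + j' := by
  have hn : 0 < n := lt_of_le_of_lt hj0 hj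
  have hmul : (i + 1) * n ≤ i' * n := mul_le_mul_of_nonneg_right (by omega) (le_of_lt hn)
  nlinarith

theorem mem_hit (meds : List String) (p1 p2 : Int × String) (z : Int × List (String × String))
    (h : z ∈ pvHit meds p1 p2) : z.1 = p1.1 * pvN meds + p2.1 ∧ p1.1 < p2.1 := by
  unfold pvHit at h
  split_ifs at h with hge
  · simp at h
  · rcases hlook : pvLook p1.2 p2.2 with _ | info <;> rw [hlook] at h
    · rcases hlook2 : pvLook p2.2 p1.2 with _ | info <;> rw [hlook2] at h
      · simp at h
      · simp at h
        exact ⟨by rw [h], by omega⟩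
    · simp at h
      exact ⟨by rw [h], by omega⟩

theorem K0_pairwise (meds : List String) : (pvK0 meds).Pairwise (fun a b => a.1 < b.1) := by
  unfold pvK0
  rw [List.pairwise_flatMap]
  constructor
  · intro p1 hp1
    rw [List.pairwise_flatMap]
    constructor
    · intro p2 hp2
      unfold pvHit
      split_ifs
      · exact List.Pairwise.nil
      · rcases pvLook p1.2 p2.2 with _ | info
        · rcases pvLook p2.2 p1.2 with _ | info
          · exact List.Pairwise.nil
          · exact List.pairwise_singleton _ _
        · exact List.pairwise_singleton _ _
    · refine List.Pairwise.imp_of_mem ?_ (PySem.List.pairwise_lt_enumerate (pvL meds) 0)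
      intro p2 p2' h2 h2' hlt z hz z' hz'
      obtain ⟨hk, _⟩ := mem_hit meds p1 p2 z hz
      obtain ⟨hk', _⟩ := mem_hit meds p1 p2' z' hz'
      rw [hk, hk']
      omega
  · refine List.Pairwise.imp_of_mem ?_ (PySem.List.pairwise_lt_enumerate (pvL meds) 0)
    intro p1 p1' h1 h1' hlt z hz z' hz'
    rcases List.mem_flatMap.1 hz with ⟨p2, hp2, hzin⟩
    rcases List.mem_flatMap.1 hz' with ⟨p2', hp2', hzin'⟩
    obtain ⟨hk, hij⟩ := mem_hit meds p1 p2 z hzin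
    obtain ⟨hk', hij'⟩ := mem_hit meds p1' p2' z' hzin'
    obtain ⟨hb1, hb2⟩ := enum_bounds meds p2 hp2
    rw [hk, hk']
    exact key_lt _ _ _ _ _ hb1 hb2 hlt (enum_bounds meds p2' hp2').1


theorem mem_K0_iff (meds : List String) (z : Int × List (String × String)) :
    z ∈ pvK0 meds ↔ pvDesc meds z := by
  have hlen : (pvL meds).length = meds.length := by simp [pvL]
  unfold pvK0 pvDesc
  simp only [List.mem_flatMap]
  constructor
  · rintro ⟨p1, hp1, p2, hp2, hz⟩
    rcases (PySem.List.mem_enumerate_iff _ _ _).1 hp1 with ⟨k1, hk1, rfl⟩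
    rcases (PySem.List.mem_enumerate_iff _ _ _).1 hp2 with ⟨k2, hk2, rfl⟩
    unfold pvHit at hz
    simp only [zero_add] at hz
    split_ifs at hz with hge
    · simp at hz
    · have hk12 : k1 < k2 := by
        simp only [ge_iff_le, not_le] at hge
        exact_mod_cast hge
      have hv1 : (pvL meds).getD k1 "" = (pvL meds)[k1] := by
        simp [List.getD_eq_getElem?_getD, List.getElem?_eq_getElem hk1]
      have hv2 : (pvL meds).getD k2 "" = (pvL meds)[k2] := by
        simp [List.getD_eq_getElem?_getD, List.getElem?_eq_getElem hk2]
      rcases hf : pvLook (pvL meds)[k1] (pvL meds)[k2] with _ | info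
      · rw [hf] at hz
        rcases hr : pvLook (pvL meds)[k2] (pvL meds)[k1] with _ | info
        · rw [hr] at hz; simp at hz
        · rw [hr] at hz
          simp only [List.mem_singleton] at hz
          refine ⟨k2, k1, by omega, by omega, by omega, info, ?_, ?_⟩
          · rw [hv1, hv2]; exact hr
          · rw [hz]
            have : pvKey (pvN meds) (k2 : Int) (k1 : Int) = (k1 : Int) * pvN meds + (k2 : Int) := by
              have hc : ¬ ((k2 : Int) < (k1 : Int)) := by exact_mod_cast not_lt.2 (le_of_lt hk12)
              unfold pvKey
              rw [if_neg hc, if_neg hc]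
            rw [this]
      · rw [hf] at hz
        simp only [List.mem_singleton] at hz
        refine ⟨k1, k2, by omega, by omega, by omega, info, ?_, ?_⟩
        · rw [hv1, hv2]; exact hf
        · rw [hz]
          have : pvKey (pvN meds) (k1 : Int) (k2 : Int) = (k1 : Int) * pvN meds + (k2 : Int) := by
            have hc : ((k1 : Int) < (k2 : Int)) := by exact_mod_cast hk12
            unfold pvKey
            rw [if_pos hc, if_pos hc]
          rw [this]
  · rintro ⟨p, q, hp, hq, hpq, info, hlook, rfl⟩
    have hp' : p < (pvL meds).length := by omega
    have hq' : q < (pvL meds).length := by omega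
    have hvp : (pvL meds).getD p "" = (pvL meds)[p] := by
      simp [List.getD_eq_getElem?_getD, List.getElem?_eq_getElem hp']
    have hvq : (pvL meds).getD q "" = (pvL meds)[q] := by
      simp [List.getD_eq_getElem?_getD, List.getElem?_eq_getElem hq']
    rw [hvp, hvq] at hlook
    rcases Nat.lt_or_ge p q with hlt | hge
    · refine ⟨((p : Int), (pvL meds)[p]), ?_, ((q : Int), (pvL meds)[q]), ?_, ?_⟩
      · exact (PySem.List.mem_enumerate_iff _ _ _).2 ⟨p, hp', by simp⟩
      · exact (PySem.List.mem_enumerate_iff _ _ _).2 ⟨q, hq', by simp⟩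
      · unfold pvHit
        rw [if_neg (by simp; exact_mod_cast hlt), hlook]
        simp only [List.mem_singleton]
        have : pvKey (pvN meds) (p : Int) (q : Int) = (p : Int) * pvN meds + (q : Int) := by
          have hc : ((p : Int) < (q : Int)) := by exact_mod_cast hlt
          unfold pvKey
          rw [if_pos hc, if_pos hc]
        rw [this]
    · have hgt : q < p := by omega
      refine ⟨((q : Int), (pvL meds)[q]), ?_, ((p : Int), (pvL meds)[p]), ?_, ?_⟩
      · exact (PySem.List.mem_enumerate_iff _ _ _).2 ⟨q, hq', by simp⟩
      · exact (PySem.List.mem_enumerate_iff _ _ _).2 ⟨p, hp', by simp⟩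
      · unfold pvHit
        have hnone : pvLook (pvL meds)[q] (pvL meds)[p] = none := by
          rcases (look_iff _ _ _).1 hlook with ⟨ae, hae, hx, be, hbe, hy, hinfo⟩
          rw [← hx, ← hy]
          exact tf_asym ae hae be hbe
        rw [if_neg (by simp; exact_mod_cast hgt), hnone, hlook]
        simp only [List.mem_singleton]
        have : pvKey (pvN meds) (p : Int) (q : Int) = (q : Int) * pvN meds + (p : Int) := by
          have hc : ¬ ((p : Int) < (q : Int)) := by exact_mod_cast not_lt.2 (le_of_lt hgt)
          unfold pvKey
          rw [if_neg hc, if_neg hc]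
        rw [this]

theorem mem_K_iff (meds : List String) (z : Int × List (String × String)) :
    z ∈ pvK meds ↔ pvDesc meds z := by
  unfold pvK pvDesc
  simp only [List.mem_flatMap]
  constructor
  · rintro ⟨ae, hae, be, hbe, p, hp, q, hq, hz⟩
    by_cases hpq : p == q
    · simp [hpq] at hz
    · simp only [hpq, Bool.false_eq_true, if_false, List.mem_singleton] at hz
      rcases (mem_pos_iff meds ae.1 p).1 hp with ⟨k, hk, hvk, rfl⟩
      rcases (mem_pos_iff meds be.1 q).1 hq with ⟨k', hk', hvk', rfl⟩
      refine ⟨k, k', hk, hk', ?_, be.2, ?_, hz⟩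
      · intro he
        apply (by simpa using hpq : ¬ ((k : Int) = (k' : Int)))
        exact_mod_cast he
      · rw [hvk, hvk']
        exact (look_iff _ _ _).2 ⟨ae, hae, rfl, be, hbe, rfl, rfl⟩
  · rintro ⟨p, q, hp, hq, hpq, info, hlook, rfl⟩
    rcases (look_iff _ _ _).1 hlook with ⟨ae, hae, hx, be, hbe, hy, hinfo⟩
    refine ⟨ae, hae, be, hbe, (p : Int), ?_, (q : Int), ?_, ?_⟩
    · exact (mem_pos_iff _ _ _).2 ⟨p, hp, hx.symm ▸ rfl, rfl⟩
    · exact (mem_pos_iff _ _ _).2 ⟨q, hq, hy.symm ▸ rfl, rfl⟩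
    · have hne : ((p : Int) == (q : Int)) = false := by
        simp only [beq_eq_false_iff_ne, ne_eq, Int.natCast_inj]
        exact hpq
      simp [hne, hinfo]

theorem mem_cell {n p q : Int} {e : List (String × String)} {z : Int × List (String × String)}
    (h : z ∈ (if p == q then ([] : List (Int × List (String × String))) else [(pvKey n p q, e)])) :
    p ≠ q ∧ z.1 = pvKey n p q := by
  by_cases hpq : p == q
  · simp [hpq] at h
  · simp only [hpq, Bool.false_eq_true, if_false, List.mem_singleton] at h
    exact ⟨by simpa using hpq, by rw [h]⟩

theorem pos_master (meds : List String) {x y x' y' : String} {p q p' q' : Int}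
    (hp : p ∈ (pvPos meds).getD x []) (hq : q ∈ (pvPos meds).getD y [])
    (hp' : p' ∈ (pvPos meds).getD x' []) (hq' : q' ∈ (pvPos meds).getD y' [])
    (hpq : p ≠ q) (hpq' : p' ≠ q')
    (hkey : pvKey (pvN meds) p q = pvKey (pvN meds) p' q') :
    (x = x' ∧ y = y' ∧ p = p' ∧ q = q') ∨ (x = y' ∧ y = x' ∧ p = q' ∧ q = p') := by
  obtain ⟨hp0, hpn⟩ := pos_bounds meds x p hp
  obtain ⟨hq0, hqn⟩ := pos_bounds meds y q hq
  obtain ⟨hp0', hpn'⟩ := pos_bounds meds x' p' hp'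
  obtain ⟨hq0', hqn'⟩ := pos_bounds meds y' q' hq'
  rcases key_inj (pvN meds) p q p' q' hp0 hq0 hp0' hq0' hpn hqn hpn' hqn' hkey with ⟨e1, e2⟩ | ⟨e1, e2⟩
  · exact Or.inl ⟨pos_val_eq meds x x' p hp (e1 ▸ hp'), pos_val_eq meds y y' q hq (e2 ▸ hq'), e1, e2⟩
  · exact Or.inr ⟨pos_val_eq meds x y' p hp (e1 ▸ hq'), pos_val_eq meds y x' q hq (e2 ▸ hp'), e1, e2⟩

theorem items_pairwise_ne {ν : Type} (d : PySem.Dict String ν) (h : d.keys.Nodup) :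
    d.items.Pairwise (fun a b => a.1 ≠ b.1) := by
  simp only [PySem.Dict.keys] at h
  exact (List.pairwise_map).1 h

theorem K_pairwise_ne (meds : List String) : (pvK meds).Pairwise (fun a b => a.1 ≠ b.1) := by
  unfold pvK
  rw [List.pairwise_flatMap]
  constructor
  · intro ae hae
    rw [List.pairwise_flatMap]
    constructor
    · intro be hbe
      rw [List.pairwise_flatMap]
      constructor
      · intro p hp
        rw [List.pairwise_flatMap]
        constructor
        · intro q hq
          by_cases hpq : p == q <;> simp [hpq]
        · refine List.Pairwise.imp_of_mem ?_ (pos_pairwise meds be.1)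
          intro q q' hqm hqm' hlt z hz z' hz'
          obtain ⟨hne, hk⟩ := mem_cell hz
          obtain ⟨hne', hk'⟩ := mem_cell hz'
          rw [hk, hk']
          intro heq
          rcases pos_master meds hp hqm hp hqm' hne hne' heq with ⟨_, _, _, e⟩ | ⟨_, _, e, _⟩ <;> omega
      · refine List.Pairwise.imp_of_mem ?_ (pos_pairwise meds ae.1)
        intro p p' hpm hpm' hlt z hz z' hz'
        rcases List.mem_flatMap.1 hz with ⟨q, hqm, hcell⟩
        rcases List.mem_flatMap.1 hz' with ⟨q', hqm', hcell'⟩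
        obtain ⟨hne, hk⟩ := mem_cell hcell
        obtain ⟨hne', hk'⟩ := mem_cell hcell'
        rw [hk, hk']
        intro heq
        rcases pos_master meds hpm hqm hpm' hqm' hne hne' heq with ⟨_, _, e, _⟩ | ⟨e1, _, _, _⟩
        · omega
        · exact tf_irrefl ae hae be hbe e1
    · refine List.Pairwise.imp_of_mem ?_ (items_pairwise_ne _ (tf_nodup_inner ae hae))
      intro be be' hbem hbem' hne0 z hz z' hz'
      rcases List.mem_flatMap.1 hz with ⟨p, hpm, hz2⟩
      rcases List.mem_flatMap.1 hz2 with ⟨q, hqm, hcell⟩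
      rcases List.mem_flatMap.1 hz' with ⟨p', hpm', hz2'⟩
      rcases List.mem_flatMap.1 hz2' with ⟨q', hqm', hcell'⟩
      obtain ⟨hne, hk⟩ := mem_cell hcell
      obtain ⟨hne', hk'⟩ := mem_cell hcell'
      rw [hk, hk']
      intro heq
      rcases pos_master meds hpm hqm hpm' hqm' hne hne' heq with ⟨_, e2, _, _⟩ | ⟨_, e2, _, _⟩
      · exact hne0 (e2 ▸ rfl)
      · exact tf_irrefl ae hae be hbem (e2.symm)
  · refine List.Pairwise.imp_of_mem ?_ (items_pairwise_ne _ tf_nodup_outer)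
    intro ae ae' haem haem' hne0 z hz z' hz'
    rcases List.mem_flatMap.1 hz with ⟨be, hbe, hz2⟩
    rcases List.mem_flatMap.1 hz2 with ⟨p, hpm, hz3⟩
    rcases List.mem_flatMap.1 hz3 with ⟨q, hqm, hcell⟩
    rcases List.mem_flatMap.1 hz' with ⟨be', hbe', hz2'⟩
    rcases List.mem_flatMap.1 hz2' with ⟨p', hpm', hz3'⟩
    rcases List.mem_flatMap.1 hz3' with ⟨q', hqm', hcell'⟩
    obtain ⟨hne, hk⟩ := mem_cell hcell
    obtain ⟨hne', hk'⟩ := mem_cell hcell'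
    rw [hk, hk']
    intro heq
    rcases pos_master meds hpm hqm hpm' hqm' hne hne' heq with ⟨e1, _, _, _⟩ | ⟨e1, e2, _, _⟩
    · exact hne0 e1
    · have hsome : pvLook ae.1 be.1 = some be.2 :=
        (look_iff _ _ _).2 ⟨ae, haem, rfl, be, hbe, rfl, rfl⟩
      have hnone : pvLook ae.1 be.1 = none := by
        have := tf_asym ae' haem' be' hbe'
        rw [← e1, ← e2] at this
        exact this
      rw [hsome] at hnone
      cases hnone

theorem sortedK_eq_K0 (meds : List String) :
    PySem.List.sorted (pvK meds) (fun t => t.1) = pvK0 meds := by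
  have ndK0 : (pvK0 meds).Nodup :=
    (K0_pairwise meds).imp (fun {a b} h => fun he => by rw [he] at h; exact lt_irrefl _ h)
  have ndK : (pvK meds).Nodup :=
    (K_pairwise_ne meds).imp (fun {a b} h => fun he => h (by rw [he]))
  refine PySem.List.sorted_eq_of_perm_of_pairwise_lt _ _ _ ?_ (K0_pairwise meds)
  exact (List.perm_ext_iff_of_nodup ndK0 ndK).2
    (fun z => (mem_K0_iff meds z).trans (mem_K_iff meds z).symm)

theorem A_eq (meds : List String) :
    check_drug_interactions meds = (pvK0 meds).map (fun z => z.2) := by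
  show (PySem.List.enumerate (pvL meds)).foldl (fun interactions p1 =>
    (PySem.List.enumerate (pvL meds)).foldl (fun interactions p2 =>
      if p1.1 ≥ p2.1 then interactions
      else
        let found : Option (PySem.Dict String String × String × String) :=
          match (DRUG_INTERACTIONS.get? p1.2).bind (fun d => d.get? p2.2) with
          | some interaction =>
              some (interaction, PySem.List.pyGetD meds p1.1 "", PySem.List.pyGetD meds p2.1 "")
          | none =>
              match (DRUG_INTERACTIONS.get? p2.2).bind (fun d => d.get? p1.2) with
              | some interaction =>
                  some (interaction, PySem.List.pyGetD meds p2.1 "", PySem.List.pyGetD meds p1.1 "")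
              | none => none
        match found with
        | none => interactions
        | some (interaction, drug_a, drug_b) =>
            interactions ++
              [[("drug_a", drug_a), ("drug_b", drug_b),
                ("severity", interaction.getD "severity" ""),
                ("effect", interaction.getD "effect" ""),
                ("action",
                  if interaction.getD "severity" "" == "high" then "Avoid this combination"
                  else if interaction.getD "severity" "" == "moderate" then "Use with caution, monitor closely"
                  else "Generally safe, routine monitoring")]])
      interactions) [] = (pvK0 meds).map (fun z => z.2)
  unfold pvK0
  rw [foldl_body_append _ _
      (fun p1 => (PySem.List.enumerate (pvL meds)).flatMap fun p2 => (pvHit meds p1 p2).map (fun z => z.2))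
      (fun acc p1 => foldl_body_append _ _ _ (fun acc2 p2 => ?_) acc)]
  · simp [List.map_flatMap]
  · show _ = acc2 ++ (pvHit meds p1 p2).map (fun z => z.2)
    unfold pvHit
    split_ifs with hge
    · simp
    · rcases hf : pvLook p1.2 p2.2 with _ | info
      · rcases hr : pvLook p2.2 p1.2 with _ | info
        · simp only [pvLook] at hf hr
          simp [hf, hr]
        · simp only [pvLook] at hf hr
          simp [hf, hr, pvEntry]
      · simp only [pvLook] at hf
        simp [hf, pvEntry]

theorem B_eq (meds : List String) :
    check_drug_interactions_alt meds = (PySem.List.sorted (pvK meds) (fun t => t.1)).map (fun z => z.2) := by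
  show (PySem.List.sorted
    (DRUG_INTERACTIONS.items.foldl (fun keyed ae =>
      ae.2.items.foldl (fun keyed be =>
        (((pvPos meds).getD ae.1 []).foldl (fun keyed p =>
          (((pvPos meds).getD be.1 []).foldl (fun keyed q =>
            if p == q then keyed
            else keyed ++ [(pvKey (pvN meds) p q, pvEntry meds be.2 p q)])
            keyed)) keyed)) keyed) [])
    (fun t => t.1)).map (fun t => t.2) = _
  unfold pvK
  have h4 : ∀ (be : String × PySem.Dict String String) (p : Int) (acc4 : List (Int × List (String × String))) (q : Int),
      (if p == q then acc4 else acc4 ++ [(pvKey (pvN meds) p q, pvEntry meds be.2 p q)]) =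
        acc4 ++ (if p == q then [] else [(pvKey (pvN meds) p q, pvEntry meds be.2 p q)]) := by
    intro be p acc4 q
    by_cases hpq : p == q <;> simp [hpq]
  have h3 : ∀ (ae : String × PySem.Dict String (PySem.Dict String String))
      (be : String × PySem.Dict String String) (acc3 : List (Int × List (String × String))) (p : Int),
      ((pvPos meds).getD be.1 []).foldl (fun keyed q =>
          if p == q then keyed else keyed ++ [(pvKey (pvN meds) p q, pvEntry meds be.2 p q)]) acc3 =
        acc3 ++ ((pvPos meds).getD be.1 []).flatMap (fun q =>
          if p == q then [] else [(pvKey (pvN meds) p q, pvEntry meds be.2 p q)]) := by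
    intro ae be acc3 p
    exact foldl_body_append _ _ _ (fun acc4 q => h4 be p acc4 q) acc3
  have h2 : ∀ (ae : String × PySem.Dict String (PySem.Dict String String))
      (acc2 : List (Int × List (String × String))) (be : String × PySem.Dict String String),
      ((pvPos meds).getD ae.1 []).foldl (fun keyed p =>
          ((pvPos meds).getD be.1 []).foldl (fun keyed q =>
            if p == q then keyed else keyed ++ [(pvKey (pvN meds) p q, pvEntry meds be.2 p q)]) keyed) acc2 =
        acc2 ++ ((pvPos meds).getD ae.1 []).flatMap (fun p =>
          ((pvPos meds).getD be.1 []).flatMap (fun q =>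
            if p == q then [] else [(pvKey (pvN meds) p q, pvEntry meds be.2 p q)])) := by
    intro ae acc2 be
    exact foldl_body_append _ _ _ (fun acc3 p => h3 ae be acc3 p) acc2
  have h1 : ∀ (acc : List (Int × List (String × String)))
      (ae : String × PySem.Dict String (PySem.Dict String String)),
      ae.2.items.foldl (fun keyed be =>
        ((pvPos meds).getD ae.1 []).foldl (fun keyed p =>
          ((pvPos meds).getD be.1 []).foldl (fun keyed q =>
            if p == q then keyed else keyed ++ [(pvKey (pvN meds) p q, pvEntry meds be.2 p q)]) keyed) keyed) acc =
        acc ++ ae.2.items.flatMap (fun be =>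
          ((pvPos meds).getD ae.1 []).flatMap (fun p =>
            ((pvPos meds).getD be.1 []).flatMap (fun q =>
              if p == q then [] else [(pvKey (pvN meds) p q, pvEntry meds be.2 p q)]))) := by
    intro acc ae
    exact foldl_body_append _ _ _ (fun acc2 be => h2 ae acc2 be) acc
  rw [foldl_body_append _ _ _ h1 [], List.nil_append]

-- ===== VERDICT (by name: the statement is the Claim_ definition above) =====
theorem check_drug_interactions_spec : Claim_equal_check_drug_interactions := by
  intro meds _hdom
  show check_drug_interactions meds = check_drug_interactions_alt meds
  rw [A_eq, B_eq, sortedK_eq_K0]
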